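-- pv_equiv track=rewrite | github.com/KatyBrown/CIAlign | cropseq.py | countGaps
-- ===== SOURCE A (Python) =====
-- def countGaps(sequence):
--     '''
--     Counts the gaps in a sequence for each non-gap position
--
--     Parameters
--     ----------
--
--     sequence: array
--
--     Returns
--     -------
--     todo
--         array of ints of the length of the sequence without gaps
--
--     '''
--
--     gapNumbers = []
--     gapCounter = 0
--
--     for element in sequence:
--         if element == '-':
--             gapCounter += 1
--         else:
--             gapNumbers.append(gapCounter)
--
--     return gapNumbers
-- ===== SOURCE B (Python) =====
-- def countGaps(sequence):
--     # Two-phase: build an inclusive cumulative gap-count table, then keep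
--     # the counts at non-gap positions (inclusive count there = gaps before it).
--     prefix = []
--     c = 0
--     for e in sequence:
--         c += (e == '-')
--         prefix.append(c)
--     return [p for e, p in zip(sequence, prefix) if e != '-']
-- ===== Notes on version B (the rewrite author's own statement) =====
-- stated objective: alternative
-- what changed: Replaces A's single incremental counter loop (conditionally appending) with a two-phase computation: a cumulative gap-count prefix table over the whole sequence, then a zip-filter keeping counts at non-gap positions.
import Mathlib
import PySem

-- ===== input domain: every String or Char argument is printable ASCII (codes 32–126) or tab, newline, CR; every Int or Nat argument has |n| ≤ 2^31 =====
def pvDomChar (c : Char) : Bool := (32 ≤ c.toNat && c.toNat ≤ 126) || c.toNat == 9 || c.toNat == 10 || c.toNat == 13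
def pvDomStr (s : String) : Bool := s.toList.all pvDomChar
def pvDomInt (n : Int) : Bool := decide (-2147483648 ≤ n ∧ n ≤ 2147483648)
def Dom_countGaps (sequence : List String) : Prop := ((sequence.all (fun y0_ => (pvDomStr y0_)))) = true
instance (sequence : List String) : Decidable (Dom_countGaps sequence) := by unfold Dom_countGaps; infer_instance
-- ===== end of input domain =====

-- B replaces A's incremental loop with a prefix-table-then-filter decomposition (same cost; alternative structure).

-- ===== PORT A =====
-- A: one loop over the sequence, incrementing a counter on '-' and appending it otherwise.
def countGaps (sequence : List String) : List Int :=
  (sequence.foldl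
    (fun (st : List Int × Int) element =>
      if element = "-" then (st.1, st.2 + 1) else (st.1 ++ [st.2], st.2))
    ([], 0)).1

-- ===== PORT B =====
-- inclusive cumulative gap-count table (B's first loop)
def cgPrefix (sequence : List String) (c : Int) : List Int :=
  match sequence with
  | [] => []
  | e :: rest =>
    let c' := c + (if e = "-" then 1 else 0)
    c' :: cgPrefix rest c'

def countGaps_alt (sequence : List String) : List Int :=
  ((sequence.zip (cgPrefix sequence 0)).filter (fun p => p.1 ≠ "-")).map Prod.snd

-- ===== PRECONDITION & SPEC =====
def Spec_countGaps (sequence : List String) (out : List Int) : Prop := out = countGaps_alt sequence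
instance (sequence : List String) (out : List Int) : Decidable (Spec_countGaps sequence out) := by unfold Spec_countGaps; infer_instance

-- ===== CLAIM (what is proved, stated in full; the proofs are below) =====
def Claim_equal_countGaps : Prop := ∀ (sequence : List String), Dom_countGaps sequence → Spec_countGaps sequence (countGaps sequence)

-- ===== LEMMAS AND PROOFS =====
theorem cg_loop (sequence : List String) (acc : List Int) (c : Int) :
    (sequence.foldl
      (fun (st : List Int × Int) element =>
        if element = "-" then (st.1, st.2 + 1) else (st.1 ++ [st.2], st.2))
      (acc, c)).1
    = acc ++ ((sequence.zip (cgPrefix sequence c)).filter (fun p => p.1 ≠ "-")).map Prod.snd := by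
  induction sequence generalizing acc c with
  | nil => simp
  | cons e rest ih =>
    by_cases h : e = "-"
    · simp [cgPrefix, h, ih]
    · simp [cgPrefix, h, ih]

-- ===== VERDICT (by name: the statement is the Claim_ definition above) =====
theorem countGaps_spec : Claim_equal_countGaps := by
  intro sequence _
  unfold Spec_countGaps countGaps countGaps_alt
  simpa using cg_loop sequence [] 0
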